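-- pv_equiv track=rewrite | github.com/ketkat001/Programmers-coding | Level_2/멀쩡한사각형.py | solution
-- ===== SOURCE A (Python) =====
-- def solution(w, h):
--     num1, num2 = max(w, h), min(w, h)
--     while True:
--         if num1 % num2 == 0:
--             temp = num2
--             break
--         num1, num2 = num2, num1 % num2
--     answer = w*h - (w+h-temp)
--     return answer
-- ===== SOURCE B (Python) =====
-- def gcd(a, b):
--     return a if b == 0 else gcd(b, a % b)
--
--
-- def solution(w, h):
--     return w * h - (w + h - gcd(max(w, h), min(w, h)))
-- ===== Notes on version B (the rewrite author's own statement) =====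
-- stated objective: simpler
-- what changed: Replaces A's while-True loop with mutating pair state by a recursive Euclidean gcd helper and a one-line closed-form return.
import Mathlib
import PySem

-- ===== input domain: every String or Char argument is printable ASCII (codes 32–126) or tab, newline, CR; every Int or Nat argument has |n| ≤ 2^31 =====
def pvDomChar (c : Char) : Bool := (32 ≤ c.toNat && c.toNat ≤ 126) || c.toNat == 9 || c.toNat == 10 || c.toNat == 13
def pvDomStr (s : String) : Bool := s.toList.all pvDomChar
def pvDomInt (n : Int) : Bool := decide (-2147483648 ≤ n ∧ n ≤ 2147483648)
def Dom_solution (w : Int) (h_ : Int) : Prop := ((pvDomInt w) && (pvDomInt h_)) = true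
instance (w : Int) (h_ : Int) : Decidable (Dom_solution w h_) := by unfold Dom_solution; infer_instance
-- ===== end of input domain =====

-- B replaces A's while-True gcd loop by a recursive Euclidean gcd helper and a one-line return (objective: simpler).


-- |a % b| shrinks below |b| (Python mod, b ≠ 0): termination measure for both recursions
theorem pyMod_natAbs_lt (a b : Int) (hb : b ≠ 0) :
    (PySem.Int.mod a b).natAbs < b.natAbs := by
  rcases lt_or_gt_of_ne hb with h | h
  · have := PySem.Int.mod_neg_bounds a h
    omega
  · have h1 := PySem.Int.mod_nonneg a h
    have h2 := PySem.Int.mod_lt a h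
    omega

-- ===== PORT A =====
-- the 'while True' loop of A; num2 = 0 would be Python's ZeroDivisionError (excluded by Pre_), junk 0 returned
def solutionLoop (num1 num2 : Int) : Int :=
  if h : num2 = 0 then 0
  else if PySem.Int.mod num1 num2 = 0 then num2
  else solutionLoop num2 (PySem.Int.mod num1 num2)
termination_by num2.natAbs
decreasing_by exact pyMod_natAbs_lt num1 num2 h

def solution (w : Int) (h_ : Int) : Int :=
  let temp := solutionLoop (max w h_) (min w h_)
  w * h_ - (w + h_ - temp)

-- ===== PORT B =====
def gcdB (a b : Int) : Int :=
  if h : b = 0 then a else gcdB b (PySem.Int.mod a b)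
termination_by b.natAbs
decreasing_by exact pyMod_natAbs_lt a b h

def solution_alt (w : Int) (h_ : Int) : Int :=
  w * h_ - (w + h_ - gcdB (max w h_) (min w h_))

-- ===== PRECONDITION & SPEC =====
-- A raises ZeroDivisionError exactly when min(w, h) = 0 (the first 'num1 % num2' divides by zero)
def Pre_solution (w : Int) (h_ : Int) : Prop := min w h_ ≠ 0
instance (w : Int) (h_ : Int) : Decidable (Pre_solution w h_) := by unfold Pre_solution; infer_instance
def pvWitness_solution : Int × Int := (4, 6)

def Spec_solution (w : Int) (h_ : Int) (out : Int) : Prop := out = solution_alt w h_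
instance (w : Int) (h_ : Int) (out : Int) : Decidable (Spec_solution w h_ out) := by unfold Spec_solution; infer_instance

-- ===== CLAIM (what is proved, stated in full; the proofs are below) =====
def Claim_equal_solution : Prop := ∀ (w : Int) (h_ : Int), Dom_solution w h_ → Pre_solution w h_ → Spec_solution w h_ (solution w h_)

-- ===== LEMMAS AND PROOFS =====
theorem loop_eq_gcdB_aux (m : Nat) : ∀ (n1 n2 : Int), n2.natAbs = m → n2 ≠ 0 → solutionLoop n1 n2 = gcdB n1 n2 := by
  induction m using Nat.strong_induction_on with
  | _ m ih =>
    intro n1 n2 hm hne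
    rw [solutionLoop, gcdB]
    simp only [hne, dite_false]
    by_cases hz : PySem.Int.mod n1 n2 = 0
    · rw [if_pos hz, gcdB]
      simp [hz]
    · rw [if_neg hz]
      exact ih (PySem.Int.mod n1 n2).natAbs (hm ▸ pyMod_natAbs_lt n1 n2 hne) n2 _ rfl hz

theorem loop_eq_gcdB (n1 n2 : Int) (h : n2 ≠ 0) : solutionLoop n1 n2 = gcdB n1 n2 :=
  loop_eq_gcdB_aux n2.natAbs n1 n2 rfl h

-- ===== VERDICT =====
theorem solution_spec : Claim_equal_solution := by
  intro w h_ _ hpre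
  unfold Spec_solution solution solution_alt
  rw [loop_eq_gcdB _ _ hpre]
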